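-- pv_equiv track=rewrite | github.com/Birrus09/procedural-low-poly-environment-with-noise | proc_noise.py | biggify
-- ===== SOURCE A (Python) =====
-- def biggify(source, width, factor):
--     big_noise = []
--     L = len(source)
--     for i in range(0, L, width):
--         for k in range(factor):
--             for z in range(i, i + width):
--                 idx = min(z, L - 1)
--                 for n in range(factor):
--                     big_noise.append(source[idx])
--     return big_noise
-- ===== SOURCE B (Python) =====
-- def biggify(source, width, factor):
--     # Closed-form gather: the output is a single flat list whose t-th element is
--     # decoded from t by integer arithmetic, instead of four nested generating loops.
--     L = len(source)
--     if width <= 0 or factor <= 0: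
--         return []
--     nchunks = -(-L // width)          # ceil(L / width) = number of chunks
--     rowlen = width * factor           # one horizontally-expanded row
--     block = factor * rowlen           # one chunk's full output block
--     return [source[min((t // block) * width + (t % rowlen) // factor, L - 1)]
--             for t in range(nchunks * block)]
-- ===== Notes on version B (the rewrite author's own statement) =====
-- stated objective: alternative
-- what changed: Replaces A's four nested generating loops by a closed-form gather: the output length is computed arithmetically and a single flat pass decodes each output position t with div/mod into its source index, so no nested iteration structure remains.
import Mathlib
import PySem

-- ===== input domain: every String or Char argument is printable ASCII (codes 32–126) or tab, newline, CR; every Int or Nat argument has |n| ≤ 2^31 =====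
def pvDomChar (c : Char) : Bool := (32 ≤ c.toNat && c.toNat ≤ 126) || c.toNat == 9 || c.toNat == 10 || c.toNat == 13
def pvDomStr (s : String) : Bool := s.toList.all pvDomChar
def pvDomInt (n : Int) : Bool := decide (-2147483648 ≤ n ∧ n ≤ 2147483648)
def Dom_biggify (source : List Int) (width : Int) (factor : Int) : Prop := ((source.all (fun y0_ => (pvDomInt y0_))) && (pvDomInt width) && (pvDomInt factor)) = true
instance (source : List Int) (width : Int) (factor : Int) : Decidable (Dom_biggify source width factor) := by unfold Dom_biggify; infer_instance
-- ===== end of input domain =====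

-- B computes the upscaled array as a closed-form gather — one flat pass over the output
-- positions, decoding each position with div/mod into its source index — instead of A's
-- four nested generating loops (objective: alternative).

-- ===== PORT A =====
def biggify (source : List Int) (width : Int) (factor : Int) : List Int :=
  (PySem.List.pyRange 0 (source.length : Int) width).foldl (fun acc i =>
    (PySem.List.pyRange 0 factor 1).foldl (fun acc _k =>
      (PySem.List.pyRange i (i + width) 1).foldl (fun acc z =>
        (PySem.List.pyRange 0 factor 1).foldl (fun acc _n =>
          acc ++ [PySem.List.pyGetD source (min z ((source.length : Int) - 1)) 0]) acc) acc) acc) []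

-- ===== PORT B =====
def biggify_alt (source : List Int) (width : Int) (factor : Int) : List Int :=
  if width ≤ 0 ∨ factor ≤ 0 then [] else
  (PySem.List.pyRange 0 (-(PySem.Int.floordiv (-(source.length : Int)) width) * (factor * (width * factor))) 1).map
    (fun t =>
      PySem.List.pyGetD source
        (min (PySem.Int.floordiv t (factor * (width * factor)) * width
              + PySem.Int.floordiv (PySem.Int.mod t (width * factor)) factor)
             ((source.length : Int) - 1)) 0)

-- ===== PRECONDITION & SPEC =====
-- Pre_ excludes only width = 0, where Python's range(0, L, 0) raises ValueError in A.
def Pre_biggify (source : List Int) (width : Int) (factor : Int) : Prop := width ≠ 0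
instance (source : List Int) (width : Int) (factor : Int) : Decidable (Pre_biggify source width factor) := by unfold Pre_biggify; infer_instance
def pvWitness_biggify : List Int × Int × Int := ([1, 2, 3], 2, 2)

def Spec_biggify (source : List Int) (width : Int) (factor : Int) (out : List Int) : Prop := out = biggify_alt source width factor
instance (source : List Int) (width : Int) (factor : Int) (out : List Int) : Decidable (Spec_biggify source width factor out) := by unfold Spec_biggify; infer_instance

-- ===== CLAIM (what is proved, stated in full; the proofs are below) =====
def Claim_equal_biggify : Prop := ∀ (source : List Int) (width : Int) (factor : Int), Dom_biggify source width factor → Pre_biggify source width factor → Spec_biggify source width factor (biggify source width factor)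

-- ===== LEMMAS AND PROOFS =====

-- flattening a range of length n*m into nested ranges (the div/mod decode, list side)
lemma range_mul_map {α : Type} (n m : Nat) (f : Nat → α) :
    (List.range (n*m)).map f
      = (List.range n).flatMap (fun a => (List.range m).map (fun b => f (a*m+b))) := by
  induction n with
  | zero => simp
  | succ n ih =>
    have h : (n+1)*m = n*m + m := by ring
    rw [h, List.range_add, List.map_append, ih, List.range_succ, List.flatMap_append]
    simp [List.map_map, Function.comp]

-- the index decode: t = c*(f*(w*f)) + k*(w*f) + j*f + n recovers chunk c and offset j
lemma decode_eq (w f : Nat) (hw : 0 < w) (hf : 0 < f)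
    (c k j n : Nat) (hk : k < f) (hj : j < w) (hn : n < f) :
    PySem.Int.floordiv ((c*(f*(w*f)) + (k*(w*f) + (j*f + n)) : Nat) : Int) ((f:Int)*((w:Int)*(f:Int))) * (w:Int)
      + PySem.Int.floordiv (PySem.Int.mod ((c*(f*(w*f)) + (k*(w*f) + (j*f + n)) : Nat) : Int) ((w:Int)*(f:Int))) (f:Int)
    = (w:Int)*(c:Int) + (j:Int) := by
  have hcast1 : (f:Int)*((w:Int)*(f:Int)) = ((f*(w*f) : Nat) : Int) := by push_cast; ring
  have hcast2 : (w:Int)*(f:Int) = ((w*f : Nat) : Int) := by push_cast; ring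
  rw [hcast1, hcast2, PySem.Int.floordiv_natCast, PySem.Int.mod_natCast, PySem.Int.floordiv_natCast]
  have hs : j*f + n < w*f := by
    calc j*f + n < j*f + f := by omega
    _ = (j+1)*f := by ring
    _ ≤ w*f := Nat.mul_le_mul_right f hj
  have hr : k*(w*f) + (j*f+n) < f*(w*f) := by
    calc k*(w*f) + (j*f+n) < k*(w*f) + w*f := by omega
    _ = (k+1)*(w*f) := by ring
    _ ≤ f*(w*f) := Nat.mul_le_mul_right _ hk
  have hdiv : (c*(f*(w*f)) + (k*(w*f)+(j*f+n))) / (f*(w*f)) = c := by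
    rw [mul_comm c, Nat.mul_add_div (by positivity), Nat.div_eq_of_lt hr]
    omega
  have hmod : (c*(f*(w*f)) + (k*(w*f)+(j*f+n))) % (w*f) = j*f + n := by
    have h1 : c*(f*(w*f)) + (k*(w*f)+(j*f+n)) = (j*f+n) + (c*f + k)*(w*f) := by ring
    rw [h1, Nat.add_mul_mod_self_right, Nat.mod_eq_of_lt hs]
  have hdiv2 : (j*f+n)/f = j := by
    rw [mul_comm j, Nat.mul_add_div hf, Nat.div_eq_of_lt hn]
    omega
  rw [hdiv, hmod, hdiv2]
  ring

-- ===== VERDICT (by name: the statement is the Claim_ definition above) =====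
theorem biggify_spec : Claim_equal_biggify := by
  intro source width factor _ hpre
  unfold Pre_biggify at hpre
  unfold Spec_biggify biggify biggify_alt
  by_cases hwp : width ≤ 0
  · -- width < 0: A's chunk range is empty and B's guard fires
    have h1 : ¬ (0:Int) < width := by omega
    have h2 : ¬ ((source.length:Int) < 0) := by simp
    have hA : PySem.List.pyRange 0 (source.length : Int) width = [] := by
      simp [PySem.List.pyRange, hpre, h1, h2]
    rw [hA]
    simp [hwp]
  · by_cases hfp : factor ≤ 0
    · -- factor ≤ 0: every inner range is empty, both sides are []
      have hr : PySem.List.pyRange 0 factor 1 = [] := PySem.List.pyRange_one_eq_nil (by omega)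
      simp [hr, hfp]
    · -- main case: width > 0, factor > 0
      have hwp' : 0 < width := by omega
      have hfp' : 0 < factor := by omega
      obtain ⟨w, rfl⟩ := Int.eq_ofNat_of_zero_le hwp'.le
      obtain ⟨f, rfl⟩ := Int.eq_ofNat_of_zero_le hfp'.le
      have hw0 : 0 < w := by exact_mod_cast hwp'
      have hf0 : 0 < f := by exact_mod_cast hfp'
      set Ln := source.length with hLn
      set Cn := (Ln + w - 1)/w with hCn
      -- the chunk count of A's stepped range
      have hcount : (if (0:Int) < (Ln:Int) then (((Ln:Int) - 0 + w - 1)/(w:Int)).toNat else 0) = Cn := by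
        split
        · have e1 : (Ln:Int) - 0 + w - 1 = ((Ln + w - 1 : Nat):Int) := by omega
          rw [e1, ← PySem.Int.floordiv_eq_ediv_of_pos (by exact_mod_cast hw0),
            PySem.Int.floordiv_natCast, Int.toNat_natCast]
        · have hz : Ln = 0 := by omega
          rw [hCn, hz]
          exact (Nat.div_eq_of_lt (by omega)).symm
      -- B's chunk count: ceil division written as -((-L) // w)
      have g1 : Cn * w ≤ Ln + w - 1 := by rw [hCn]; exact Nat.div_mul_le_self _ _
      have g2 : Ln ≤ Cn * w := by
        have hdm : w * Cn + (Ln + w - 1) % w = Ln + w - 1 := by rw [hCn]; exact Nat.div_add_mod _ _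
        have hml : (Ln + w - 1) % w < w := Nat.mod_lt _ hw0
        have hmc : Cn * w = w * Cn := Nat.mul_comm _ _
        rw [hmc]
        generalize hq : w * Cn = q at hdm ⊢
        generalize hrr : (Ln + w - 1) % w = r at hdm hml
        omega
      have hnch : -(PySem.Int.floordiv (-(Ln:Int)) (w:Int)) = (Cn:Int) := by
        rw [PySem.Int.neg_floordiv_neg_eq_iff_of_pos (by exact_mod_cast hw0)]
        have e2 : (Cn:Int) * (w:Int) = ((Cn * w : Nat) : Int) := by push_cast; ring
        have e3 : ((Cn:Int) - 1) * (w:Int) = ((Cn * w : Nat) : Int) - (w:Int) := by push_cast; ring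
        rw [e2, e3]
        constructor
        · generalize hq : Cn * w = q at g1 g2 ⊢; omega
        · generalize hq : Cn * w = q at g1 g2 ⊢; omega
      -- rewrite all ranges to List.range maps
      rw [if_neg (by push Not; exact ⟨by exact_mod_cast hwp', by exact_mod_cast hfp'⟩)]
      rw [hnch]
      have e4 : (Cn:Int) * ((f:Int)*((w:Int)*(f:Int))) = ((Cn*(f*(w*f)) : Nat) : Int) := by push_cast; ring
      rw [e4]
      rw [PySem.List.pyRange_of_pos 0 (Ln:Int) (by exact_mod_cast hw0)]
      simp only [sub_zero] at hcount ⊢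
      rw [hcount]
      simp only [PySem.List.pyRange_one, sub_zero, zero_add, add_sub_cancel_left,
        Int.toNat_natCast, List.map_map]
      -- A is now nested folds over List.range; turn the folds into flatMaps
      simp only [PySem.List.foldl_append_singleton_eq_map, PySem.List.foldl_append_eq_flatMap,
        List.nil_append, List.flatMap_map, List.map_map]
      -- B: peel the flat range into the same nested shape
      rw [range_mul_map]
      simp only [range_mul_map]
      apply List.flatMap_congr
      intro c hc
      apply List.flatMap_congr
      intro k hk
      apply List.flatMap_congr
      intro j hj
      apply List.map_congr_left
      intro n hn
      simp only [Function.comp]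
      rw [decode_eq w f hw0 hf0 c k j n (List.mem_range.mp hk) (List.mem_range.mp hj) (List.mem_range.mp hn)]
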